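-- pv_equiv track=rewrite | github.com/JohnBatmanMySlinky/Advent-of-Code | 2021/03/solution03.py | part1
-- ===== SOURCE A (Python) =====
-- def part1(dat):
--     gamma = ''
--     for n in range(len(dat[0])):
--         zero = 0
--         for x in dat:
--             if x[n] == '0':
--                 zero += 1
--         if zero > len(dat)/2:
--             gamma += '0'
--         else:
--             gamma += '1'
--
--     epsilon = ''.join(['0' if y == '1' else '1' for y in gamma])
--
--     return int('0b'+gamma,2) * int('0b'+epsilon,2)
-- ===== SOURCE B (Python) =====
-- def part1(dat):
--     # One pass over the rows accumulating per-column zero counts,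
--     # then emit gamma as an integer directly and get epsilon arithmetically.
--     cols = len(dat[0])
--     zeros = [0] * cols
--     for row in dat:
--         zeros = [zeros[i] + (row[i] == '0') for i in range(cols)]
--     gamma = 0
--     for z in zeros:
--         gamma = 2 * gamma + (0 if 2 * z > len(dat) else 1)
--     return gamma * ((1 << cols) - 1 - gamma)
-- ===== Notes on version B (the rewrite author's own statement) =====
-- stated objective: alternative
-- what changed: B makes one pass over the rows building a per-column zero-count table (instead of re-scanning all rows once per column), accumulates gamma directly as an integer, and computes epsilon arithmetically as 2^cols-1-gamma instead of flipping and re-parsing a bit string.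
import Mathlib
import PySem

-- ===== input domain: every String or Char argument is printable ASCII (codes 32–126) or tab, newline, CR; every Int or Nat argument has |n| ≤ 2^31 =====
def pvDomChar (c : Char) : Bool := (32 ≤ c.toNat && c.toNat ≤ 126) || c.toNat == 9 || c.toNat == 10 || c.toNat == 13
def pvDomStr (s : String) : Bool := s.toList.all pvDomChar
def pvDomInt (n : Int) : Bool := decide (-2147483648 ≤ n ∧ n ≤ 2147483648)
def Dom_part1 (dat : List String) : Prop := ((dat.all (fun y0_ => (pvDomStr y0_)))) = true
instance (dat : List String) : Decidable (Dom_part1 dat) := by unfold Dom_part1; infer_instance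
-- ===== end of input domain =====

-- B changes the decomposition: one pass over the rows builds a per-column zero-count table,
-- gamma is accumulated as an integer, and epsilon is 2^cols-1-gamma (no string flip/parse).

-- ===== PORT A =====
-- int('0b'+s, 2) for a string of '0'/'1' characters (all A ever builds): its binary value.
def pvBinVal (cs : List Char) : Int :=
  cs.foldl (fun a c => 2 * a + (if c = '1' then 1 else 0)) 0

-- literal port of A; 'zero > len(dat)/2' is ported exactly as '2*zero > len(dat)'
-- (exact: an integer exceeds n/2 iff its double exceeds n; the float n/2 is exact for |n| ≤ 2^31)
def part1 (dat : List String) : Int :=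
  let gamma : List Char :=
    (PySem.List.pyRange 0 ((dat.headD "").toList.length : Int) 1).foldl (fun g n =>
      let zero : Int := dat.foldl (fun z x =>
        if ((PySem.Str.pyGet? x n).getD ' ') = '0' then z + 1 else z) 0
      if 2 * zero > (dat.length : Int) then g ++ ['0'] else g ++ ['1']) []
  let epsilon : List Char := gamma.map (fun y => if y = '1' then '0' else '1')
  pvBinVal gamma * pvBinVal epsilon

-- ===== PORT B =====
def part1_alt (dat : List String) : Int :=
  let cols := (dat.headD "").toList.length
  let zeros : List Int := dat.foldl (fun zs row =>
      (List.range cols).map (fun i =>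
        zs.getD i 0 + (if ((PySem.Str.pyGet? row (i : Int)).getD ' ') = '0' then 1 else 0)))
    (List.replicate cols 0)
  let gamma : Int := zeros.foldl (fun g z =>
      2 * g + (if 2 * z > (dat.length : Int) then 0 else 1)) 0
  gamma * (2 ^ cols - 1 - gamma)

-- ===== PRECONDITION & SPEC =====
-- Pre_ excludes exactly the inputs on which Python A raises: the empty list (dat[0] IndexError),
-- rows shorter than the first row (x[n] IndexError), and a first row of length 0
-- (int('0b','2') ValueError).
def Pre_part1 (dat : List String) : Prop :=
  dat ≠ [] ∧ 0 < (dat.headD "").toList.length ∧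
    ∀ x ∈ dat, (dat.headD "").toList.length ≤ x.toList.length
instance (dat : List String) : Decidable (Pre_part1 dat) := by unfold Pre_part1; infer_instance

def pvWitness_part1 : List String := ["010", "111", "000"]

def Spec_part1 (dat : List String) (out : Int) : Prop := out = part1_alt dat
instance (dat : List String) (out : Int) : Decidable (Spec_part1 dat out) := by unfold Spec_part1; infer_instance

-- ===== CLAIM (what is proved, stated in full; the proofs are below) =====
def Claim_equal_part1 : Prop := ∀ (dat : List String), Dom_part1 dat → Pre_part1 dat → Spec_part1 dat (part1 dat)
-- ===== LEMMAS AND PROOFS =====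

-- the per-column zero count both programs compute
def pvCnt (dat : List String) (i : Nat) : Int :=
  dat.foldl (fun z x => z + (if x.toList.getD i ' ' = '0' then 1 else 0)) 0

-- the per-column bit of gamma
def pvBit (dat : List String) (i : Nat) : Int :=
  if 2 * pvCnt dat i > (dat.length : Int) then 0 else 1

-- binary-value fold on Int digits
def pvV (a : Int) (bs : List Int) : Int := bs.foldl (fun x b => 2 * x + b) a

theorem pvV_foldl_shift (bs : List Int) (a : Int) :
    bs.foldl (fun x b => 2 * x + b) a
      = a * 2 ^ bs.length + bs.foldl (fun x b => 2 * x + b) 0 := by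
  induction bs generalizing a with
  | nil => simp
  | cons b bs ih =>
      simp only [List.foldl_cons, List.length_cons]
      rw [ih (2 * a + b), ih (2 * 0 + b)]
      ring

theorem pvV_flip (bs : List Int) (h : ∀ b ∈ bs, b = 0 ∨ b = 1) :
    pvV 0 (bs.map (fun b => 1 - b)) = 2 ^ bs.length - 1 - pvV 0 bs := by
  induction bs with
  | nil => simp [pvV]
  | cons b bs ih =>
      have hb := h b (List.mem_cons_self ..)
      have hbs : ∀ x ∈ bs, x = 0 ∨ x = 1 := fun x hx => h x (List.mem_cons_of_mem _ hx)
      simp only [List.map_cons, List.length_cons, pvV, List.foldl_cons] at *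
      rw [pvV_foldl_shift _ (2 * 0 + (1 - b)), pvV_foldl_shift _ (2 * 0 + b), ih hbs]
      simp only [List.length_map]
      rcases hb with h1 | h1 <;> subst h1 <;> ring

-- shifting the accumulator out of the counting fold
theorem pvCnt_foldl_shift (i : Nat) (l : List String) (a : Int) :
    l.foldl (fun z x => z + (if x.toList.getD i ' ' = '0' then 1 else 0)) a
      = a + pvCnt l i := by
  unfold pvCnt
  induction l generalizing a with
  | nil => simp
  | cons y ys ih =>
      simp only [List.foldl_cons]
      rw [ih, ih (0 + _)]
      ring

theorem pvCnt_cons (row : String) (rest : List String) (i : Nat) :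
    pvCnt (row :: rest) i
      = (if row.toList.getD i ' ' = '0' then 1 else 0) + pvCnt rest i := by
  simp only [pvCnt, List.foldl_cons, zero_add]
  rw [pvCnt_foldl_shift, pvCnt]

-- A's inner counting loop computes pvCnt
theorem pvCntA_eq (dat : List String) (i : Nat) :
    dat.foldl (fun z x =>
        if ((PySem.Str.pyGet? x (i : Int)).getD ' ') = '0' then z + 1 else z) 0
      = pvCnt dat i := by
  have hfn : (fun z x =>
        if ((PySem.Str.pyGet? x (i : Int)).getD ' ') = '0' then z + 1 else z)
      = (fun (z : Int) (x : String) =>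
        z + (if x.toList.getD i ' ' = '0' then 1 else 0)) := by
    funext z x
    simp only [PySem.Str.pyGet?_natCast, ← List.getD_eq_getElem?_getD]
    split <;> ring
  rw [hfn]
  rfl

-- A's char accumulation is a map over the range
theorem pvGamma_eq_map (dat : List String) :
    (PySem.List.pyRange 0 ((dat.headD "").toList.length : Int) 1).foldl (fun g n =>
      let zero : Int := dat.foldl (fun z x =>
        if ((PySem.Str.pyGet? x n).getD ' ') = '0' then z + 1 else z) 0
      if 2 * zero > (dat.length : Int) then g ++ ['0'] else g ++ ['1']) []
    = (List.range (dat.headD "").toList.length).map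
        (fun i => if pvBit dat i = 0 then '0' else '1') := by
  rw [PySem.List.pyRange_zero_natCast, List.foldl_map]
  have hb : ∀ (g : List Char) (i : Nat),
      (if 2 * (dat.foldl (fun z x =>
          if ((PySem.Str.pyGet? x (i : Int)).getD ' ') = '0' then z + 1 else z) 0)
        > (dat.length : Int) then g ++ ['0'] else g ++ ['1'])
      = g ++ [if pvBit dat i = 0 then '0' else '1'] := by
    intro g i
    rw [pvCntA_eq]
    unfold pvBit
    split_ifs <;> simp_all
  simp only [hb]
  rw [PySem.List.foldl_append_singleton_eq_map]
  exact List.nil_append _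

-- B's zero-count table is the per-column count
theorem pvZeros_eq (dat' : List String) (cols : Nat) (f : Nat → Int) :
    dat'.foldl (fun zs row =>
      (List.range cols).map (fun i =>
        zs.getD i 0 + (if ((PySem.Str.pyGet? row (i : Int)).getD ' ') = '0' then 1 else 0)))
      ((List.range cols).map f)
    = (List.range cols).map (fun i => f i + pvCnt dat' i) := by
  induction dat' generalizing f with
  | nil => simp [pvCnt]
  | cons row rest ih =>
      simp only [List.foldl_cons]
      have hstep : (List.range cols).map (fun i =>
            ((List.range cols).map f).getD i 0
              + (if ((PySem.Str.pyGet? row (i : Int)).getD ' ') = '0' then 1 else 0))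
          = (List.range cols).map
              (fun j => f j + (if row.toList.getD j ' ' = '0' then 1 else 0)) := by
        refine List.map_congr_left (fun i hi => ?_)
        have hilt : i < cols := List.mem_range.mp hi
        have h1 : ((List.range cols).map f).getD i 0 = f i := by
          rw [List.getD_eq_getElem?_getD, List.getElem?_map, List.getElem?_range hilt]
          rfl
        rw [h1]
        simp only [PySem.Str.pyGet?_natCast]
        rw [← List.getD_eq_getElem?_getD]
      rw [hstep, ih]
      refine List.map_congr_left (fun i _ => ?_)
      rw [pvCnt_cons]
      ring

-- the 0/1 digit behind each gamma character
theorem pvCharVal (dat : List String) (i : Nat) :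
    (if (if pvBit dat i = 0 then '0' else '1') = '1' then (1 : Int) else 0)
      = pvBit dat i := by
  unfold pvBit
  split <;> simp

-- value of a gamma char list through pvBinVal
theorem pvBinVal_map_bits (dat : List String) (cols : Nat) :
    pvBinVal ((List.range cols).map (fun i => if pvBit dat i = 0 then '0' else '1'))
      = pvV 0 ((List.range cols).map (pvBit dat)) := by
  unfold pvBinVal pvV
  rw [List.foldl_map, List.foldl_map]
  simp only [pvCharVal]

theorem pvBinVal_flip (dat : List String) (cols : Nat) :
    pvBinVal (((List.range cols).map (fun i => if pvBit dat i = 0 then '0' else '1')).map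
        (fun y => if y = '1' then '0' else '1'))
      = pvV 0 (((List.range cols).map (pvBit dat)).map (fun b => 1 - b)) := by
  unfold pvBinVal pvV
  rw [List.map_map, List.map_map, List.foldl_map, List.foldl_map]
  refine PySem.List.foldl_congr_mem _ _ _ _ (fun a i _ => ?_)
  simp only [Function.comp]
  unfold pvBit
  split <;> simp

theorem part1_eq_alt (dat : List String) : part1 dat = part1_alt dat := by
  unfold part1 part1_alt
  simp only []
  rw [pvGamma_eq_map]
  have hrep : (List.replicate ((dat.headD "").toList.length) (0 : Int))
      = (List.range ((dat.headD "").toList.length)).map (fun _ => (0 : Int)) := by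
    simp [List.map_const']
  rw [hrep, pvZeros_eq dat ((dat.headD "").toList.length) (fun _ => 0)]
  simp only [zero_add]
  have hBg : ((List.range ((dat.headD "").toList.length)).map (pvCnt dat)).foldl (fun g z =>
        2 * g + (if 2 * z > (dat.length : Int) then 0 else 1)) 0
      = pvV 0 ((List.range ((dat.headD "").toList.length)).map (pvBit dat)) := by
    unfold pvV pvBit
    rw [List.foldl_map, List.foldl_map]
  have hbits01 : ∀ b ∈ (List.range ((dat.headD "").toList.length)).map (pvBit dat),
      b = 0 ∨ b = 1 := by
    intro b hb
    rcases List.mem_map.mp hb with ⟨i, _, rfl⟩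
    unfold pvBit; split <;> simp
  rw [pvBinVal_map_bits, pvBinVal_flip, pvV_flip _ hbits01, hBg]
  simp [List.length_map, List.length_range]

-- ===== VERDICT (by name: the statement is the Claim_ definition above) =====
theorem part1_spec : Claim_equal_part1 := by
  intro dat _ _
  unfold Spec_part1
  exact part1_eq_alt dat
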